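-- pv_equiv track=rewrite | github.com/Princess-luleigh/Intro_python | Week 6/bukiyip/bukiyip.py | bukiyip_to_decimal
-- ===== SOURCE A (Python) =====
-- def bukiyip_to_decimal(a):
--     num = str(a)
--     index = 0
--     decimal = 0
--     for i in range(len(num) - 1, -1, -1):
--         decimal += int(num[i]) * 3 ** (index)
--         index += 1
--     return decimal
-- ===== SOURCE B (Python) =====
-- def bukiyip_to_decimal(a):
--     decimal = 0
--     for ch in str(a):
--         decimal = decimal * 3 + int(ch)
--     return decimal
-- ===== Notes on version B (the rewrite author's own statement) =====
-- stated objective: simpler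
-- what changed: Replaces the reversed index loop that recomputes a fresh power of three each step by a left-to-right Horner accumulation (decimal = decimal*base + digit) over str(a), dropping the index variable and the power computation.
import Mathlib
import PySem

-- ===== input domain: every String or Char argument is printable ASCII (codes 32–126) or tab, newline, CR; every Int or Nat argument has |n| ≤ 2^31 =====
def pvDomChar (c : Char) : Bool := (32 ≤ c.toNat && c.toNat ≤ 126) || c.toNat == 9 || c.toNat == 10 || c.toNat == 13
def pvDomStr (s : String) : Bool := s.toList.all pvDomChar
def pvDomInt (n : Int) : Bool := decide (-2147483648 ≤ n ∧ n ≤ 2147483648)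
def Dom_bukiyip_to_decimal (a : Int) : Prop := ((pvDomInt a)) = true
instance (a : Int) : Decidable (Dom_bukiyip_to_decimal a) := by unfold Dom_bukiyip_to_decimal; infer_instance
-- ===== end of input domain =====

-- B replaces A's reversed index loop with its recomputed power of three by a left-to-right
-- Horner accumulation; equivalence of RETURN values is proved on Pre_ (nonnegative a; on
-- negative a both Pythons raise ValueError at the minus sign).

-- int(ch) for a one-character string (ValueError → none; '0' default never used on Pre_)
def pyDigit (c : Char) : Int := (PySem.Int.ofChars? [c]).getD 0

-- ===== PORT A =====
def bukiyip_to_decimal (a : Int) : Int :=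
  ((PySem.List.pyRange (((PySem.Int.toChars a).length : Int) - 1) (-1) (-1)).foldl
      (fun (st : Int × Int) i =>
        (st.1 + pyDigit (PySem.List.pyGetD (PySem.Int.toChars a) i '0') * 3 ^ st.2.toNat, st.2 + 1))
      (0, 0)).1

-- ===== PORT B =====
def bukiyip_to_decimal_alt (a : Int) : Int :=
  (PySem.Int.toChars a).foldl (fun dec c => dec * 3 + pyDigit c) 0

-- ===== PRECONDITION & SPEC =====
-- Pre_ excludes negative a: there str(a) begins with a minus sign and A raises ValueError (so does B).
def Pre_bukiyip_to_decimal (a : Int) : Prop := 0 ≤ a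
instance (a : Int) : Decidable (Pre_bukiyip_to_decimal a) := by unfold Pre_bukiyip_to_decimal; infer_instance
def pvWitness_bukiyip_to_decimal : Int := (2101)

def Spec_bukiyip_to_decimal (a : Int) (out : Int) : Prop := out = bukiyip_to_decimal_alt a
instance (a : Int) (out : Int) : Decidable (Spec_bukiyip_to_decimal a out) := by unfold Spec_bukiyip_to_decimal; infer_instance

-- ===== CLAIM (what is proved, stated in full; the proofs are below) =====
def Claim_equal_bukiyip_to_decimal : Prop := ∀ (a : Int), Dom_bukiyip_to_decimal a → Pre_bukiyip_to_decimal a → Spec_bukiyip_to_decimal a (bukiyip_to_decimal a)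

-- ===== LEMMAS AND PROOFS =====

-- big-endian value of a digit list: evalBE (c :: r) = d c * 3^|r| + evalBE r
def evalBE : List Char → Int
  | [] => 0
  | c :: r => pyDigit c * 3 ^ r.length + evalBE r

theorem evalBE_append_singleton (xs : List Char) (c : Char) :
    evalBE (xs ++ [c]) = 3 * evalBE xs + pyDigit c := by
  induction xs with
  | nil => simp [evalBE]
  | cons x r ih => simp [evalBE, ih]; ring

theorem horner_foldl (l : List Char) (acc : Int) :
    l.foldl (fun dec c => dec * 3 + pyDigit c) acc = acc * 3 ^ l.length + evalBE l := by
  induction l generalizing acc with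
  | nil => simp [evalBE]
  | cons c r ih => simp [List.foldl, evalBE, ih]; ring

theorem foldA_eq (cs : List Char) (dec idx : Int) (hidx : 0 ≤ idx) :
    ((PySem.List.pyRange ((cs.length : Int) - 1) (-1) (-1)).foldl
        (fun (st : Int × Int) i =>
          (st.1 + pyDigit (PySem.List.pyGetD cs i '0') * 3 ^ st.2.toNat, st.2 + 1))
        (dec, idx))
      = (dec + 3 ^ idx.toNat * evalBE cs, idx + cs.length) := by
  induction cs using List.reverseRecOn generalizing dec idx with
  | nil =>
    rw [PySem.List.pyRange_neg_one_eq_nil (by simp)]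
    simp [evalBE]
  | append_singleton ys c ih =>
    have hlen : ((ys ++ [c]).length : Int) - 1 = (ys.length : Int) := by
      simp
    rw [hlen, PySem.List.pyRange_neg_one_cons (by omega)]
    simp only [List.foldl_cons]
    have hget : PySem.List.pyGetD (ys ++ [c]) ((ys.length : Int)) '0' = c := by
      rw [PySem.List.pyGetD_natCast]; simp
    rw [hget]
    have hcong : ((PySem.List.pyRange ((ys.length : Int) - 1) (-1) (-1)).foldl
        (fun (st : Int × Int) i =>
          (st.1 + pyDigit (PySem.List.pyGetD (ys ++ [c]) i '0') * 3 ^ st.2.toNat, st.2 + 1))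
        (dec + pyDigit c * 3 ^ idx.toNat, idx + 1))
      = ((PySem.List.pyRange ((ys.length : Int) - 1) (-1) (-1)).foldl
        (fun (st : Int × Int) i =>
          (st.1 + pyDigit (PySem.List.pyGetD ys i '0') * 3 ^ st.2.toNat, st.2 + 1))
        (dec + pyDigit c * 3 ^ idx.toNat, idx + 1)) := by
      apply PySem.List.foldl_congr_mem
      intro acc x hx
      rw [PySem.List.mem_pyRange_neg_one] at hx
      have h0 : 0 ≤ x := by omega
      have h1 : x < (ys.length : Int) := by omega
      have hg : PySem.List.pyGetD (ys ++ [c]) x '0' = PySem.List.pyGetD ys x '0' := by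
        rw [PySem.List.pyGetD_eq_getElem (ys ++ [c]) '0' h0 (by simp; omega),
            PySem.List.pyGetD_eq_getElem ys '0' h0 (by simpa using h1)]
        exact List.getElem_append_left (by omega)
      rw [hg]
    rw [hcong, ih _ _ (by omega)]
    rw [evalBE_append_singleton]
    have hpow : (idx + 1).toNat = idx.toNat + 1 := by omega
    refine Prod.ext ?_ ?_
    · show dec + pyDigit c * 3 ^ idx.toNat + 3 ^ (idx + 1).toNat * evalBE ys
        = dec + 3 ^ idx.toNat * (3 * evalBE ys + pyDigit c)
      rw [hpow, pow_succ]; ring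
    · show idx + 1 + (ys.length : Int) = idx + ((ys ++ [c]).length : Int)
      simp; ring

-- ===== VERDICT (by name: the statement is the Claim_ definition above) =====
theorem bukiyip_to_decimal_spec : Claim_equal_bukiyip_to_decimal := by
  intro a _ _
  unfold Spec_bukiyip_to_decimal bukiyip_to_decimal bukiyip_to_decimal_alt
  rw [foldA_eq _ 0 0 le_rfl, horner_foldl]
  simp
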